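-- pv_equiv track=rewrite | github.com/GAIA-IE/oneie | oneie/merge.py | find_overlapping_triggers_adv
-- ===== SOURCE A (Python) =====
-- import itertools
-- from typing import List, Dict, Any, Tuple, Set, Union
--
-- def find_overlapping_triggers_adv(old_spans: List[Tuple],
--                                   new_spans: List[Tuple],
--                                   special_types: Union[Set[str], List[str]]
--                                   ) -> Tuple[Set[int], Set[int]]:
--     if len(old_spans) + len(new_spans) == 0:
--         return set(), set()
--
--     max_len = max([span[1] for span in itertools.chain(old_spans, new_spans)])
--
--     # Special types
--     tokens_special = [0] * max_len
--     for span in new_spans: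
--         start, end, eventtype = span[0], span[1], span[2]
--         if eventtype in special_types:
--             for idx in range(start, end):
--                 tokens_special[idx] = 1
--
--     tokens = [0] * max_len
--     removed_old_spans = set()
--     for span_idx, span in enumerate(old_spans):
--         start, end = span[0], span[1]
--         if any(tokens_special[idx] == 1 for idx in range(start, end)):
--             removed_old_spans.add(span_idx)
--         else:
--             for idx in range(start, end):
--                 tokens[idx] = 1
--
--     removed_new_spans = set()
--     for span_idx, span in enumerate(new_spans):
--         start, end = span[0], span[1]
--         if any(tokens[idx] == 1 for idx in range(start, end)):
--             removed_new_spans.add(span_idx)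
--
--     return removed_old_spans, removed_new_spans
-- ===== SOURCE B (Python) =====
-- def find_overlapping_triggers_adv(old_spans, new_spans, special_types):
--     special = [(sp[0], sp[1]) for sp in new_spans if sp[2] in special_types]
--     removed_old_spans = {i for i, sp in enumerate(old_spans)
--                          if any(max(sp[0], s) < min(sp[1], e) for s, e in special)}
--     kept = [(sp[0], sp[1]) for i, sp in enumerate(old_spans) if i not in removed_old_spans]
--     removed_new_spans = {j for j, sp in enumerate(new_spans)
--                          if any(max(sp[0], s) < min(sp[1], e) for s, e in kept)}
--     return removed_old_spans, removed_new_spans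
-- ===== Notes on version B (the rewrite author's own statement) =====
-- stated objective: simpler
-- what changed: B drops A's token-marking arrays entirely and tests span overlap by direct interval arithmetic (max(start,s) < min(end,e)) against the special intervals and then against the kept old intervals, so no O(max_len) buffers are built.
-- outside the precondition, e.g. on find_overlapping_triggers_adv([(-1, 0, 'x')], [(2, 3, 'a')], {'a'}): A returns ({0}, set()), B returns (set(), set()); on find_overlapping_triggers_adv([(-5, 1, 'x')], [(0, 2, 'a')], {'a'}): A raises IndexError, B returns ({0}, set())
import Mathlib
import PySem

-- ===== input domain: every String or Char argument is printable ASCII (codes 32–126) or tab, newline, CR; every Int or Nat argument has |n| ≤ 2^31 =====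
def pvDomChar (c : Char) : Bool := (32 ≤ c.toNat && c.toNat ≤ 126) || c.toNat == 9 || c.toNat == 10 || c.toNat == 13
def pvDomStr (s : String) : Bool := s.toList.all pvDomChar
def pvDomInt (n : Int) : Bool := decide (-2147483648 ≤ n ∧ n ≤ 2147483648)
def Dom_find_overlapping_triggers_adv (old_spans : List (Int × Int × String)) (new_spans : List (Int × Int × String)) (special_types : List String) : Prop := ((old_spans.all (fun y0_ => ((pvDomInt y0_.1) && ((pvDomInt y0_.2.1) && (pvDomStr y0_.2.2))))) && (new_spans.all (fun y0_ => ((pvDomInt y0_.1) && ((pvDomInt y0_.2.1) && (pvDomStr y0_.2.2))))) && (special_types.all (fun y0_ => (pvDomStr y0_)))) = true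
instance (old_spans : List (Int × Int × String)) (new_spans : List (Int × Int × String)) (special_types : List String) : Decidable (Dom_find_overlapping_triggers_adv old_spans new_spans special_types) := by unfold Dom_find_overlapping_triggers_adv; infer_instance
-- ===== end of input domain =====

-- ===== PORT A =====
-- B replaces A's token-marking arrays by direct interval-overlap arithmetic (objective: simpler).
-- helper for A: 'for idx in range(start, end): tokens[idx] = 1'
def markSpan (ts : List Int) (s e : Int) : List Int :=
  (PySem.List.pyRange s e 1).foldl (fun ts idx => PySem.List.pySetD ts idx 1) ts

-- helper for A: 'any(tokens[idx] == 1 for idx in range(start, end))'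
def coveredTok (ts : List Int) (s e : Int) : Bool :=
  (PySem.List.pyRange s e 1).any (fun idx => PySem.List.pyGetD ts idx 0 == 1)

def find_overlapping_triggers_adv (old_spans : List (Int × Int × String)) (new_spans : List (Int × Int × String)) (special_types : List String) : List Int × List Int :=
  if old_spans.length + new_spans.length == 0 then ([], [])
  else
    let max_len := (PySem.List.max? ((old_spans ++ new_spans).map (fun sp => sp.2.1)) (fun x => x)).getD 0
    let tokens_special := new_spans.foldl
      (fun ts sp => if special_types.contains sp.2.2 then markSpan ts sp.1 sp.2.1 else ts)
      (List.replicate max_len.toNat 0)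
    let st := (PySem.List.enumerate old_spans 0).foldl
      (fun (st : List Int × PySem.Set Int) p =>
        if coveredTok tokens_special p.2.1 p.2.2.1 then (st.1, PySem.Set.add st.2 p.1)
        else (markSpan st.1 p.2.1 p.2.2.1, st.2))
      (List.replicate max_len.toNat 0, PySem.Set.empty)
    let removed_new := (PySem.List.enumerate new_spans 0).foldl
      (fun (r : PySem.Set Int) p => if coveredTok st.1 p.2.1 p.2.2.1 then PySem.Set.add r p.1 else r)
      PySem.Set.empty
    (st.2, removed_new)

-- ===== PORT B =====
-- helper for B: 'any(max(a, s) < min(b, e) for s, e in intervals)'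
def overlapsAny (a b : Int) (iv : List (Int × Int)) : Bool :=
  iv.any (fun q => decide (max a q.1 < min b q.2))

def find_overlapping_triggers_adv_alt (old_spans : List (Int × Int × String)) (new_spans : List (Int × Int × String)) (special_types : List String) : List Int × List Int :=
  let special := (new_spans.filter (fun sp => special_types.contains sp.2.2)).map (fun sp => (sp.1, sp.2.1))
  let removed_old := ((PySem.List.enumerate old_spans 0).filter (fun p => overlapsAny p.2.1 p.2.2.1 special)).map (fun p => p.1)
  let kept := ((PySem.List.enumerate old_spans 0).filter (fun p => !removed_old.contains p.1)).map (fun p => (p.2.1, p.2.2.1))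
  let removed_new := ((PySem.List.enumerate new_spans 0).filter (fun p => overlapsAny p.2.1 p.2.2.1 kept)).map (fun p => p.1)
  (removed_old, removed_new)

-- ===== PRECONDITION & SPEC =====
-- Pre_ restricts spans to the natural domain of token-index ranges: a span whose range(start, end)
-- is non-empty must have a non-negative start (empty spans are no-ops and stay admitted); on a
-- negative start with a non-empty range A either raises IndexError or silently reads/marks tokens
-- through Python negative-index wraparound, an artefact of the token-array representation.
def Pre_find_overlapping_triggers_adv (old_spans : List (Int × Int × String)) (new_spans : List (Int × Int × String)) (_special_types : List String) : Prop :=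
  (∀ sp ∈ old_spans, 0 ≤ sp.1 ∨ sp.2.1 ≤ sp.1) ∧ (∀ sp ∈ new_spans, 0 ≤ sp.1 ∨ sp.2.1 ≤ sp.1)
instance (old_spans : List (Int × Int × String)) (new_spans : List (Int × Int × String)) (special_types : List String) : Decidable (Pre_find_overlapping_triggers_adv old_spans new_spans special_types) := by unfold Pre_find_overlapping_triggers_adv; infer_instance

def pvWitness_find_overlapping_triggers_adv : (List (Int × Int × String)) × (List (Int × Int × String)) × List String :=
  ([(0, 2, "x")], [(1, 3, "a")], ["a"])

def Spec_find_overlapping_triggers_adv (old_spans : List (Int × Int × String)) (new_spans : List (Int × Int × String)) (special_types : List String) (out : List Int × List Int) : Prop := out = find_overlapping_triggers_adv_alt old_spans new_spans special_types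
instance (old_spans : List (Int × Int × String)) (new_spans : List (Int × Int × String)) (special_types : List String) (out : List Int × List Int) : Decidable (Spec_find_overlapping_triggers_adv old_spans new_spans special_types out) := by unfold Spec_find_overlapping_triggers_adv; infer_instance

-- ===== CLAIM (what is proved, stated in full; the proofs are below) =====
def Claim_equal_find_overlapping_triggers_adv : Prop := ∀ (old_spans : List (Int × Int × String)) (new_spans : List (Int × Int × String)) (special_types : List String), Dom_find_overlapping_triggers_adv old_spans new_spans special_types → Pre_find_overlapping_triggers_adv old_spans new_spans special_types → Spec_find_overlapping_triggers_adv old_spans new_spans special_types (find_overlapping_triggers_adv old_spans new_spans special_types)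

-- ===== LEMMAS AND PROOFS =====

lemma length_markSpan (ts : List Int) (s e : Int) : (markSpan ts s e).length = ts.length := by
  unfold markSpan
  generalize (PySem.List.pyRange s e 1) = l
  induction l generalizing ts with
  | nil => rfl
  | cons x xs ih =>
    rw [List.foldl_cons, ih]
    exact PySem.List.length_pySetD ..

lemma markSpan_of_ge (ts : List Int) (s e : Int) (h : e ≤ s) : markSpan ts s e = ts := by
  unfold markSpan
  rw [PySem.List.pyRange_one_eq_nil h]
  rfl

lemma markSpan_of_lt (ts : List Int) (s e : Int) (h : s < e) :
    markSpan ts s e = markSpan (PySem.List.pySetD ts s 1) (s + 1) e := by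
  unfold markSpan
  rw [PySem.List.pyRange_one_cons h, List.foldl_cons]

lemma getElem?_markSpan (ts : List Int) (s e : Int) (hs : 0 ≤ s ∨ e ≤ s) (he : e ≤ (ts.length : Int)) (j : Nat) :
    (markSpan ts s e)[j]? = if s ≤ (j : Int) ∧ (j : Int) < e then some 1 else ts[j]? := by
  have key : ∀ (n : Nat) (s : Int) (ts : List Int), (0 ≤ s ∨ e ≤ s) → e ≤ (ts.length : Int) → (e - s).toNat = n →
      (markSpan ts s e)[j]? = if s ≤ (j : Int) ∧ (j : Int) < e then some 1 else ts[j]? := by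
    intro n
    induction n with
    | zero =>
      intro s ts hs he hn
      rw [markSpan_of_ge ts s e (by omega), if_neg (by omega)]
    | succ n ih =>
      intro s ts hs he hn
      by_cases hlt : s < e
      · rw [markSpan_of_lt ts s e hlt,
          ih (s + 1) _ (by omega) (by rw [PySem.List.length_pySetD]; exact he) (by omega)]
        have hs0 : (0:Int) ≤ s := by omega
        rw [PySem.List.pySetD_of_nonneg ts 1 hs0]
        by_cases hj : (j : Int) = s
        · have hij : s.toNat = j := by omega
          rw [if_neg (by omega), if_pos (by omega)]
          simp [List.getElem?_set, hij]
          omega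
        · have hij : s.toNat ≠ j := by omega
          have hset : (ts.set s.toNat 1)[j]? = ts[j]? := by simp [hij]
          rw [hset]
          by_cases hc : s ≤ (j : Int) ∧ (j : Int) < e
          · rw [if_pos (by omega), if_pos hc]
          · rw [if_neg (by omega), if_neg hc]
      · rw [markSpan_of_ge ts s e (by omega), if_neg (by omega)]
  exact key _ s ts hs he rfl

lemma length_foldl_mark {α : Type} (c : α → Bool) (st en : α → Int) (items : List α) (ts : List Int) :
    (items.foldl (fun ts x => if c x then markSpan ts (st x) (en x) else ts) ts).length = ts.length := by
  induction items generalizing ts with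
  | nil => rfl
  | cons x rest ih =>
    rw [List.foldl_cons, ih]
    by_cases h : c x <;> simp [h, length_markSpan]

lemma getElem?_foldl_mark {α : Type} (c : α → Bool) (st en : α → Int) (items : List α) (ts : List Int) (j : Nat)
    (hok : ∀ x ∈ items, c x = true → (0 ≤ st x ∨ en x ≤ st x) ∧ en x ≤ (ts.length : Int)) :
    (items.foldl (fun ts x => if c x then markSpan ts (st x) (en x) else ts) ts)[j]? =
      (if items.any (fun x => c x && decide (st x ≤ (j : Int)) && decide ((j : Int) < en x)) then some 1 else ts[j]?) := by
  induction items generalizing ts with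
  | nil => simp
  | cons x rest ih =>
    rw [List.foldl_cons]
    have hlen : (if c x then markSpan ts (st x) (en x) else ts).length = ts.length := by
      by_cases h : c x <;> simp [h, length_markSpan]
    rw [ih _ (fun y hy hcy => by rw [hlen]; exact hok y (List.mem_cons_of_mem x hy) hcy)]
    rw [List.any_cons]
    by_cases hr : rest.any (fun x => c x && decide (st x ≤ (j : Int)) && decide ((j : Int) < en x))
    · simp [hr]
    · simp only [hr, Bool.or_false, if_neg (by simp : ¬ (false = true))]
      by_cases hc : c x
      · obtain ⟨h1, h2⟩ := hok x List.mem_cons_self hc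
        rw [if_pos hc, getElem?_markSpan ts (st x) (en x) h1 h2 j]
        by_cases hcov : st x ≤ (j : Int) ∧ (j : Int) < en x
        · rw [if_pos hcov, if_pos (by simp [hc, hcov.1, hcov.2])]
        · rw [if_neg hcov, if_neg (by simp [hc]; omega)]
      · rw [if_neg hc, if_neg (by simp [hc])]

lemma coveredTok_eq_overlapsAny (ts : List Int) (iv : List (Int × Int)) (a b : Int)
    (hts : ∀ j : Nat, j < ts.length →
      ts[j]? = (if iv.any (fun q => decide (q.1 ≤ (j : Int)) && decide ((j : Int) < q.2)) then some 1 else some 0))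
    (ha : 0 ≤ a ∨ b ≤ a) (hb : b ≤ (ts.length : Int)) :
    coveredTok ts a b = overlapsAny a b iv := by
  by_cases hba : b ≤ a
  · unfold coveredTok overlapsAny
    rw [PySem.List.pyRange_one_eq_nil hba]
    simp only [List.any_nil]
    symm
    rw [List.any_eq_false]
    intro q hq
    simp
    omega
  have ha : (0:Int) ≤ a := by omega
  unfold coveredTok overlapsAny
  rw [Bool.eq_iff_iff]
  simp only [List.any_eq_true, PySem.List.mem_pyRange_one, beq_iff_eq, decide_eq_true_eq]
  constructor
  · rintro ⟨i, ⟨hi1, hi2⟩, hget⟩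
    have h0 : 0 ≤ i := le_trans ha hi1
    have hlt : i < (ts.length : Int) := lt_of_lt_of_le hi2 hb
    have hj : i.toNat < ts.length := by omega
    have hcast : ((i.toNat : Nat) : Int) = i := by omega
    rw [PySem.List.pyGetD_eq_getElem ts 0 h0 hlt] at hget
    have hsome : ts[i.toNat]? = some ts[i.toNat] := List.getElem?_eq_getElem hj
    rw [hts i.toNat hj] at hsome
    by_cases hcov : iv.any (fun q => decide (q.1 ≤ ((i.toNat : Nat) : Int)) && decide (((i.toNat : Nat) : Int) < q.2))
    · simp only [List.any_eq_true, Bool.and_eq_true, decide_eq_true_eq, hcast] at hcov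
      obtain ⟨q, hq, hq1, hq2⟩ := hcov
      exact ⟨q, hq, by omega⟩
    · rw [if_neg hcov] at hsome
      simp at hsome
      omega
  · rintro ⟨q, hq, hover⟩
    refine ⟨max a q.1, ⟨by omega, by omega⟩, ?_⟩
    set i : Int := max a q.1 with hidef
    have h0 : 0 ≤ i := le_trans ha (le_max_left a q.1)
    have hlt : i < (ts.length : Int) := by omega
    have hj : i.toNat < ts.length := by omega
    have hcast : ((i.toNat : Nat) : Int) = i := by omega
    rw [PySem.List.pyGetD_eq_getElem ts 0 h0 hlt]
    have hsome : ts[i.toNat]? = some ts[i.toNat] := List.getElem?_eq_getElem hj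
    rw [hts i.toNat hj, if_pos] at hsome
    · simpa using hsome.symm
    · simp only [List.any_eq_true, Bool.and_eq_true, decide_eq_true_eq, hcast]
      exact ⟨q, hq, by omega, by omega⟩

lemma foldl_setadd_eq_filter_map {α : Type} (c : (Int × α) → Bool) (l : List (Int × α)) (acc : PySem.Set Int)
    (hd : l.Pairwise (fun p q => p.1 ≠ q.1)) (hacc : ∀ p ∈ l, acc.contains p.1 = false) :
    l.foldl (fun r p => if c p then PySem.Set.add r p.1 else r) acc = acc ++ (l.filter c).map (fun p => p.1) := by
  induction l generalizing acc with
  | nil => simp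
  | cons p rest ih =>
    rw [List.foldl_cons, List.filter_cons]
    obtain ⟨hdp, hdr⟩ := List.pairwise_cons.mp hd
    by_cases hc : c p
    · rw [if_pos hc, if_pos hc]
      have hadd : PySem.Set.add acc p.1 = acc ++ [p.1] := by
        have := hacc p List.mem_cons_self
        simp [PySem.Set.add, PySem.Set.contains] at this ⊢
        simp [this]
      rw [hadd, ih _ hdr (fun q hq => by
        have h1 := hacc q (List.mem_cons_of_mem p hq)
        have h2 := hdp q hq
        simp [PySem.Set.contains] at h1 ⊢
        exact ⟨h1, fun h => (h2 h.symm).elim⟩)]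
      simp
    · rw [if_neg hc, if_neg hc]
      exact ih _ hdr (fun q hq => hacc q (List.mem_cons_of_mem p hq))

lemma mem_filter_map_fst_enumerate {α : Type} (c : (Int × α) → Bool) (xs : List α) (p : Int × α)
    (hp : p ∈ PySem.List.enumerate xs 0) :
    (((PySem.List.enumerate xs 0).filter c).map (fun q => q.1)).contains p.1 = c p := by
  by_cases hc : c p
  · rw [hc]
    simp only [List.contains_eq_mem, List.mem_map, decide_eq_true_eq]
    exact ⟨p, List.mem_filter.mpr ⟨hp, hc⟩, rfl⟩
  · have hcf : c p = false := by revert hc; cases c p <;> simp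
    rw [hcf]
    simp only [List.contains_eq_mem, List.mem_map, decide_eq_false_iff_not]
    rintro ⟨q, hqf, hq1⟩
    obtain ⟨hqe, hqc⟩ := List.mem_filter.mp hqf
    obtain ⟨k, hk, rfl⟩ := (PySem.List.mem_enumerate_iff xs 0 p).mp hp
    obtain ⟨k', hk', hqeq⟩ := (PySem.List.mem_enumerate_iff xs 0 q).mp hqe
    subst hqeq
    simp at hq1
    have : k' = k := by omega
    subst this
    rw [hcf] at hqc
    exact Bool.false_ne_true hqc

-- ===== VERDICT (by name: the statement is the Claim_ definition above) =====
set_option maxHeartbeats 1600000 in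
theorem find_overlapping_triggers_adv_spec : Claim_equal_find_overlapping_triggers_adv := by
  intro old_spans new_spans special_types _hdom hpre
  obtain ⟨hpo, hpn⟩ := hpre
  unfold Spec_find_overlapping_triggers_adv
  by_cases h0 : old_spans = [] ∧ new_spans = []
  · obtain ⟨h1, h2⟩ := h0
    subst h1; subst h2
    rfl
  · have hemp : (old_spans.length + new_spans.length == 0) = false := by
      rcases old_spans with _ | ⟨a, l⟩ <;> rcases new_spans with _ | ⟨b, l2⟩ <;> simp_all
    obtain ⟨m, hm⟩ : ∃ m, PySem.List.max? ((old_spans ++ new_spans).map (fun sp => sp.2.1)) (fun x => x) = some m := by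
      cases hmx : PySem.List.max? ((old_spans ++ new_spans).map (fun sp => sp.2.1)) (fun x => x) with
      | none =>
        rw [PySem.List.max?_eq_none_iff] at hmx
        simp at hmx
        exact absurd ⟨hmx.1, hmx.2⟩ h0
      | some m => exact ⟨m, rfl⟩
    have hM : ∀ sp ∈ old_spans ++ new_spans, sp.2.1 ≤ m := fun sp hsp =>
      PySem.List.max?_isMax hm _ (List.mem_map_of_mem hsp)
    simp only [find_overlapping_triggers_adv, find_overlapping_triggers_adv_alt, hemp,
      Bool.false_eq_true, if_false, hm, Option.getD_some]
    set SP := (new_spans.filter (fun sp => special_types.contains sp.2.2)).map (fun sp => (sp.1, sp.2.1)) with hSP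
    set TS := new_spans.foldl (fun ts sp => if special_types.contains sp.2.2 then markSpan ts sp.1 sp.2.1 else ts) (List.replicate m.toNat 0) with hTS
    have hTSlen : TS.length = m.toNat := by
      rw [hTS]
      have h : (new_spans.foldl (fun ts sp => if special_types.contains sp.2.2 then markSpan ts sp.1 sp.2.1 else ts) (List.replicate m.toNat (0:Int))).length = (List.replicate m.toNat (0:Int)).length :=
        length_foldl_mark (fun sp => special_types.contains sp.2.2) (fun sp => sp.1) (fun sp => sp.2.1) new_spans _
      simpa using h
    have hTSchar : ∀ j : Nat, j < TS.length → TS[j]? = (if SP.any (fun q => decide (q.1 ≤ (j:Int)) && decide ((j:Int) < q.2)) then some 1 else some 0) := by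
      intro j hj
      have hok : ∀ x ∈ new_spans, (special_types.contains x.2.2) = true → (0 ≤ x.1 ∨ x.2.1 ≤ x.1) ∧ x.2.1 ≤ ((List.replicate m.toNat (0:Int)).length : Int) := by
        intro x hx _
        refine ⟨hpn x hx, ?_⟩
        have := hM x (List.mem_append_right _ hx)
        simp
        omega
      have hchar : TS[j]? = (if new_spans.any (fun x => special_types.contains x.2.2 && decide (x.1 ≤ (j:Int)) && decide ((j:Int) < x.2.1)) then some 1 else (List.replicate m.toNat (0:Int))[j]?) := by
        rw [hTS]
        exact getElem?_foldl_mark (fun sp => special_types.contains sp.2.2) (fun sp => sp.1) (fun sp => sp.2.1) new_spans _ j hok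
      rw [hTSlen] at hj
      rw [hchar, show (List.replicate m.toNat (0:Int))[j]? = some 0 by simp [hj]]
      have hany : SP.any (fun q => decide (q.1 ≤ (j:Int)) && decide ((j:Int) < q.2)) = new_spans.any (fun x => special_types.contains x.2.2 && decide (x.1 ≤ (j:Int)) && decide ((j:Int) < x.2.1)) := by
        rw [hSP, List.any_map, List.any_filter]
        simp [Function.comp, Bool.and_assoc]
      rw [hany]
    have hPredO : ∀ p ∈ PySem.List.enumerate old_spans 0, coveredTok TS p.2.1 p.2.2.1 = overlapsAny p.2.1 p.2.2.1 SP := by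
      intro p hp
      obtain ⟨k, hk, rfl⟩ := (PySem.List.mem_enumerate_iff _ _ _).mp hp
      have hsp : old_spans[k] ∈ old_spans := List.getElem_mem hk
      refine coveredTok_eq_overlapsAny TS SP _ _ hTSchar (hpo _ hsp) ?_
      have := hM old_spans[k] (List.mem_append_left _ hsp)
      rw [hTSlen]
      show old_spans[k].2.1 ≤ ((m.toNat : Nat) : Int)
      omega
    have hsplit : (PySem.List.enumerate old_spans 0).foldl (fun (st : List Int × PySem.Set Int) (p : Int × (Int × Int × String)) => if coveredTok TS p.2.1 p.2.2.1 then (st.1, PySem.Set.add st.2 p.1) else (markSpan st.1 p.2.1 p.2.2.1, st.2)) (List.replicate m.toNat 0, PySem.Set.empty) = ((PySem.List.enumerate old_spans 0).foldl (fun a p => if coveredTok TS p.2.1 p.2.2.1 then a else markSpan a p.2.1 p.2.2.1) (List.replicate m.toNat 0), (PySem.List.enumerate old_spans 0).foldl (fun b p => if coveredTok TS p.2.1 p.2.2.1 then PySem.Set.add b p.1 else b) PySem.Set.empty) := by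
      rw [show (fun (st : List Int × PySem.Set Int) (p : Int × (Int × Int × String)) => if coveredTok TS p.2.1 p.2.2.1 then (st.1, PySem.Set.add st.2 p.1) else (markSpan st.1 p.2.1 p.2.2.1, st.2)) = (fun st p => ((fun a (p : Int × (Int × Int × String)) => if coveredTok TS p.2.1 p.2.2.1 then a else markSpan a p.2.1 p.2.2.1) st.1 p, (fun b (p : Int × (Int × Int × String)) => if coveredTok TS p.2.1 p.2.2.1 then PySem.Set.add b p.1 else b) st.2 p)) from by funext st p; by_cases h : coveredTok TS p.2.1 p.2.2.1 <;> simp [h]]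
      exact PySem.List.foldl_prod_mk (fun a (p : Int × (Int × Int × String)) => if coveredTok TS p.2.1 p.2.2.1 then a else markSpan a p.2.1 p.2.2.1) (fun b (p : Int × (Int × Int × String)) => if coveredTok TS p.2.1 p.2.2.1 then PySem.Set.add b p.1 else b) _ _ _
    rw [hsplit]
    dsimp only
    have hRO : (PySem.List.enumerate old_spans 0).foldl (fun b p => if coveredTok TS p.2.1 p.2.2.1 then PySem.Set.add b p.1 else b) PySem.Set.empty = ((PySem.List.enumerate old_spans 0).filter (fun p => overlapsAny p.2.1 p.2.2.1 SP)).map (fun p => p.1) := by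
      rw [PySem.List.foldl_congr_mem _ _ (fun b p => if overlapsAny p.2.1 p.2.2.1 SP then PySem.Set.add b p.1 else b) _ (fun acc x hx => by rw [hPredO x hx])]
      rw [foldl_setadd_eq_filter_map (fun (p : Int × (Int × Int × String)) => overlapsAny p.2.1 p.2.2.1 SP) _ PySem.Set.empty ((PySem.List.pairwise_lt_enumerate _ _).imp (fun h => Int.ne_of_lt h)) (fun p _ => by simp [PySem.Set.empty, PySem.Set.contains])]
      simp [PySem.Set.empty]
    rw [hRO]
    set T := (PySem.List.enumerate old_spans 0).foldl (fun a p => if coveredTok TS p.2.1 p.2.2.1 then a else markSpan a p.2.1 p.2.2.1) (List.replicate m.toNat 0) with hT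
    have hTstep : T = (PySem.List.enumerate old_spans 0).foldl (fun a p => if !(overlapsAny p.2.1 p.2.2.1 SP) then markSpan a p.2.1 p.2.2.1 else a) (List.replicate m.toNat 0) := by
      rw [hT]
      exact PySem.List.foldl_congr_mem _ _ _ _ (fun acc x hx => by
        rw [hPredO x hx]
        by_cases h : overlapsAny x.2.1 x.2.2.1 SP <;> simp [h])
    have hTlen : T.length = m.toNat := by
      rw [hTstep]
      have h : ((PySem.List.enumerate old_spans 0).foldl (fun a p => if !(overlapsAny p.2.1 p.2.2.1 SP) then markSpan a p.2.1 p.2.2.1 else a) (List.replicate m.toNat (0:Int))).length = (List.replicate m.toNat (0:Int)).length :=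
        length_foldl_mark (fun (p : Int × (Int × Int × String)) => !(overlapsAny p.2.1 p.2.2.1 SP)) (fun p => p.2.1) (fun p => p.2.2.1) _ _
      simpa using h
    have hKP : ((PySem.List.enumerate old_spans 0).filter (fun p => !(((PySem.List.enumerate old_spans 0).filter (fun p => overlapsAny p.2.1 p.2.2.1 SP)).map (fun p => p.1)).contains p.1)).map (fun p => (p.2.1, p.2.2.1)) = ((PySem.List.enumerate old_spans 0).filter (fun p => !(overlapsAny p.2.1 p.2.2.1 SP))).map (fun p => (p.2.1, p.2.2.1)) := by
      rw [List.filter_congr (fun p hp => by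
        rw [mem_filter_map_fst_enumerate (fun (p : Int × (Int × Int × String)) => overlapsAny p.2.1 p.2.2.1 SP) old_spans p hp])]
    rw [hKP]
    set KP := ((PySem.List.enumerate old_spans 0).filter (fun p => !(overlapsAny p.2.1 p.2.2.1 SP))).map (fun p => (p.2.1, p.2.2.1)) with hKPdef
    have hTchar : ∀ j : Nat, j < T.length → T[j]? = (if KP.any (fun q => decide (q.1 ≤ (j:Int)) && decide ((j:Int) < q.2)) then some 1 else some 0) := by
      intro j hj
      have hok : ∀ x ∈ PySem.List.enumerate old_spans 0, (!(overlapsAny x.2.1 x.2.2.1 SP)) = true → (0 ≤ x.2.1 ∨ x.2.2.1 ≤ x.2.1) ∧ x.2.2.1 ≤ ((List.replicate m.toNat (0:Int)).length : Int) := by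
        intro x hx _
        obtain ⟨k, hk, rfl⟩ := (PySem.List.mem_enumerate_iff _ _ _).mp hx
        have hsp : old_spans[k] ∈ old_spans := List.getElem_mem hk
        have := hM old_spans[k] (List.mem_append_left _ hsp)
        refine ⟨hpo _ hsp, ?_⟩
        show old_spans[k].2.1 ≤ ((List.replicate m.toNat (0:Int)).length : Int)
        simp
        omega
      have hchar : T[j]? = (if (PySem.List.enumerate old_spans 0).any (fun x => !(overlapsAny x.2.1 x.2.2.1 SP) && decide (x.2.1 ≤ (j:Int)) && decide ((j:Int) < x.2.2.1)) then some 1 else (List.replicate m.toNat (0:Int))[j]?) := by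
        rw [hTstep]
        exact getElem?_foldl_mark (fun (p : Int × (Int × Int × String)) => !(overlapsAny p.2.1 p.2.2.1 SP)) (fun p => p.2.1) (fun p => p.2.2.1) _ _ j hok
      rw [hTlen] at hj
      rw [hchar, show (List.replicate m.toNat (0:Int))[j]? = some 0 by simp [hj]]
      have hany : KP.any (fun q => decide (q.1 ≤ (j:Int)) && decide ((j:Int) < q.2)) = (PySem.List.enumerate old_spans 0).any (fun x => !(overlapsAny x.2.1 x.2.2.1 SP) && decide (x.2.1 ≤ (j:Int)) && decide ((j:Int) < x.2.2.1)) := by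
        rw [hKPdef, List.any_map, List.any_filter]
        simp [Function.comp, Bool.and_assoc]
      rw [hany]
    have hPredN : ∀ p ∈ PySem.List.enumerate new_spans 0, coveredTok T p.2.1 p.2.2.1 = overlapsAny p.2.1 p.2.2.1 KP := by
      intro p hp
      obtain ⟨k, hk, rfl⟩ := (PySem.List.mem_enumerate_iff _ _ _).mp hp
      have hsp : new_spans[k] ∈ new_spans := List.getElem_mem hk
      refine coveredTok_eq_overlapsAny T KP _ _ hTchar (hpn _ hsp) ?_
      have := hM new_spans[k] (List.mem_append_right _ hsp)
      rw [hTlen]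
      show new_spans[k].2.1 ≤ ((m.toNat : Nat) : Int)
      omega
    have hRN : (PySem.List.enumerate new_spans 0).foldl (fun r p => if coveredTok T p.2.1 p.2.2.1 then PySem.Set.add r p.1 else r) PySem.Set.empty = ((PySem.List.enumerate new_spans 0).filter (fun p => overlapsAny p.2.1 p.2.2.1 KP)).map (fun p => p.1) := by
      rw [PySem.List.foldl_congr_mem _ _ (fun r p => if overlapsAny p.2.1 p.2.2.1 KP then PySem.Set.add r p.1 else r) _ (fun acc x hx => by rw [hPredN x hx])]
      rw [foldl_setadd_eq_filter_map (fun (p : Int × (Int × Int × String)) => overlapsAny p.2.1 p.2.2.1 KP) _ PySem.Set.empty ((PySem.List.pairwise_lt_enumerate _ _).imp (fun h => Int.ne_of_lt h)) (fun p _ => by simp [PySem.Set.empty, PySem.Set.contains])]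
      simp [PySem.Set.empty]
    rw [hRN]
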